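-- pv_equiv track=rewrite | github.com/fardil-b/alembic_dbx | alembic/versions/2024_07_12_2300-6db72be7898f_combined_script_migration.py | split_sql_commands
-- ===== SOURCE A (Python) =====
-- def split_sql_commands(sql_content):
--     """Splits the SQL content into upgrade and downgrade parts."""
--     upgrade_sql = []
--     downgrade_sql = []
--     in_upgrade = True
--
--     for line in sql_content.splitlines():
--         if line.strip().lower() == '-- downgrade':
--             in_upgrade = False
--             continue
--         if in_upgrade:
--             upgrade_sql.append(line)
--         else:
--             downgrade_sql.append(line)
--
--     return "\n".join(upgrade_sql), "\n".join(downgrade_sql)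
-- ===== SOURCE B (Python) =====
-- def split_sql_commands(sql_content):
--     """Splits the SQL content into upgrade and downgrade parts."""
--     lines = sql_content.splitlines()
--
--     def is_marker(line):
--         return line.strip().lower() == '-- downgrade'
--
--     for i, line in enumerate(lines):
--         if is_marker(line):
--             break
--     else:
--         return "\n".join(lines), ""
--
--     upgrade = lines[:i]
--     downgrade = [l for l in lines[i + 1:] if not is_marker(l)]
--     return "\n".join(upgrade), "\n".join(downgrade)
-- ===== Notes on version B (the rewrite author's own statement) =====
-- stated objective: alternative
-- what changed: Instead of one stateful loop carrying an in_upgrade flag, B locates the first downgrade-marker line, slices the line list around it, and filters remaining marker lines out of the downgrade slice.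
import Mathlib
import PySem

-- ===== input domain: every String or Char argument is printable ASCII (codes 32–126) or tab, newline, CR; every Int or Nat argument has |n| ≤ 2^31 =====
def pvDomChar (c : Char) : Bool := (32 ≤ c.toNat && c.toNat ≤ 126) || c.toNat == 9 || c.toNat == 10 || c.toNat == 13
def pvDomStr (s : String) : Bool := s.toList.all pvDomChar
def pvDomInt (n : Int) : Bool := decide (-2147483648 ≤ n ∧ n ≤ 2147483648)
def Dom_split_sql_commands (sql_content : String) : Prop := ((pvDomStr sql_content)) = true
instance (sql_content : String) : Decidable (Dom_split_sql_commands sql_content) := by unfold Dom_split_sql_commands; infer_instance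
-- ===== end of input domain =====

-- B replaces A's stateful flag-carrying loop by: find the first '-- downgrade' marker,
-- slice the line list around it, filter marker lines out of the downgrade slice (alternative decomposition, same cost).

-- line.strip().lower() == '-- downgrade'  (the same test both Pythons perform)
def pvMarker (line : String) : Bool := PySem.Str.lower (PySem.Str.strip line) == "-- downgrade"

-- ===== PORT A =====
-- A's loop body: state = (upgrade_sql, downgrade_sql, in_upgrade)
def pvStepA (st : List String × List String × Bool) (line : String) : List String × List String × Bool :=
  if pvMarker line then (st.1, st.2.1, false)
  else if st.2.2 then (st.1 ++ [line], st.2.1, st.2.2)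
  else (st.1, st.2.1 ++ [line], st.2.2)

def split_sql_commands (sql_content : String) : String × String :=
  let st := (PySem.Str.splitlines sql_content).foldl pvStepA ([], [], true)
  (PySem.Str.join "\n" st.1, PySem.Str.join "\n" st.2.1)

-- ===== PORT B =====
def split_sql_commands_alt (sql_content : String) : String × String :=
  let lines := PySem.Str.splitlines sql_content
  match lines.findIdx? pvMarker with
  | none => (PySem.Str.join "\n" lines, "")
  | some i =>
      let upgrade := lines.take i
      let downgrade := (lines.drop (i + 1)).filter (fun l => !pvMarker l)
      (PySem.Str.join "\n" upgrade, PySem.Str.join "\n" downgrade)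

-- ===== PRECONDITION & SPEC =====
def Spec_split_sql_commands (sql_content : String) (out : String × String) : Prop := out = split_sql_commands_alt sql_content
instance (sql_content : String) (out : String × String) : Decidable (Spec_split_sql_commands sql_content out) := by unfold Spec_split_sql_commands; infer_instance

-- ===== CLAIM (what is proved, stated in full; the proofs are below) =====
def Claim_equal_split_sql_commands : Prop := ∀ (sql_content : String), Dom_split_sql_commands sql_content → Spec_split_sql_commands sql_content (split_sql_commands sql_content)

-- ===== LEMMAS AND PROOFS =====

-- Once in_upgrade is False, the loop appends exactly the non-marker lines to downgrade_sql.
lemma pvFoldA_false (lines : List String) (up down : List String) :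
    lines.foldl pvStepA (up, down, false)
      = (up, down ++ lines.filter (fun l => !pvMarker l), false) := by
  induction lines generalizing down with
  | nil => simp
  | cons x xs ih =>
      by_cases hx : pvMarker x = true <;>
        simp [pvStepA, hx, ih]

-- While in_upgrade is True: the loop's result, characterised by the first marker index.
lemma pvFoldA_true (lines : List String) (up down : List String) :
    lines.foldl pvStepA (up, down, true)
      = match lines.findIdx? pvMarker with
        | none => (up ++ lines, down, true)
        | some i => (up ++ lines.take i,
                     down ++ (lines.drop (i + 1)).filter (fun l => !pvMarker l), false) := by
  induction lines generalizing up with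
  | nil => simp
  | cons x xs ih =>
      by_cases hx : pvMarker x = true
      · simp [pvStepA, hx, List.findIdx?_cons, pvFoldA_false]
      · simp only [List.foldl_cons, pvStepA, hx, if_false, if_true, Bool.false_eq_true,
          List.findIdx?_cons, ih (up ++ [x])]
        cases h : xs.findIdx? pvMarker with
        | none => simp
        | some i => simp [List.take_succ_cons, List.drop_succ_cons]

-- ===== VERDICT (by name: the statement is the Claim_ definition above) =====
theorem split_sql_commands_spec : Claim_equal_split_sql_commands := by
  intro s _
  unfold Spec_split_sql_commands split_sql_commands split_sql_commands_alt
  rw [pvFoldA_true]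
  cases h : (PySem.Str.splitlines s).findIdx? pvMarker with
  | none => simp only [h]; simp [PySem.Str.join, PySem.Chars.join, List.intercalate]
  | some i => simp only [h, List.nil_append]
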